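-- pv_equiv track=rewrite | github.com/miliar/Code_Jam_Webscraper | solutions_python/Problem_178/2603.py | solve
-- ===== SOURCE A (Python) =====
-- def solve(data):
--   pat = ['-', '+']
--   if data[-1]==pat[0]: count=1
--   else: count=0
--   for i in range(len(data)-1):
--     if data[i] != data[i+1]:
--       count+=1
--   return count
-- ===== SOURCE B (Python) =====
-- def solve(data):
--     # Divide and conquer: transitions in data[lo:hi] = transitions of each half
--     # plus the one boundary pair, recursing on midpoints.
--     tail = 1 if data[-1] == '-' else 0
--     def trans(lo, hi):
--         if hi - lo < 2:
--             return 0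
--         mid = (lo + hi) // 2
--         return trans(lo, mid) + trans(mid, hi) + (1 if data[mid - 1] != data[mid] else 0)
--     return trans(0, len(data)) + tail
-- ===== Notes on version B (the rewrite author's own statement) =====
-- stated objective: alternative
-- what changed: B computes the transition count by divide and conquer — a recursive trans(lo,hi) that splits the interval at its midpoint, recurses on both halves and adds the single boundary comparison — instead of A's single left-to-right index loop over adjacent pairs.
import Mathlib
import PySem

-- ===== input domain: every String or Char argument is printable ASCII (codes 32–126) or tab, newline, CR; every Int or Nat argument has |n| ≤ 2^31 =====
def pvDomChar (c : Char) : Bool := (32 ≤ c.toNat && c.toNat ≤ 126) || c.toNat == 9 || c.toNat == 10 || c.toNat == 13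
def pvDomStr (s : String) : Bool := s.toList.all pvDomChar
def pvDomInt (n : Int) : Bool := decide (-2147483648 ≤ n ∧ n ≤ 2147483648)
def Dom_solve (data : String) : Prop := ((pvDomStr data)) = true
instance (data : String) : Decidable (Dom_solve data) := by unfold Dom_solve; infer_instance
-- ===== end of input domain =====

-- One honest line: B counts the transitions by divide and conquer — recursing on interval
-- midpoints and adding the one boundary comparison per split — instead of A's single
-- left-to-right index loop (objective: alternative).

-- ===== PORT A =====
def solve (data : String) : Int :=
  let cs := data.toList
  let pat : List Char := ['-', '+']
  let count : Int := if PySem.List.pyGetD cs (-1) ' ' = PySem.List.pyGetD pat 0 ' ' then 1 else 0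
  (PySem.List.pyRange 0 ((cs.length : Int) - 1) 1).foldl
    (fun count i =>
      if PySem.List.pyGetD cs i ' ' ≠ PySem.List.pyGetD cs (i + 1) ' ' then count + 1 else count)
    count

-- ===== PORT B =====
/-- Source B's inner `trans(lo, hi)`: transitions inside `data[lo:hi]`, splitting at the
midpoint and counting the boundary pair of the split. -/
def pvDC (cs : List Char) (lo hi : Int) : Int :=
  if hi - lo < 2 then 0
  else
    let mid := PySem.Int.floordiv (lo + hi) 2
    pvDC cs lo mid + pvDC cs mid hi +
      (if PySem.List.pyGetD cs (mid - 1) ' ' ≠ PySem.List.pyGetD cs mid ' ' then 1 else 0)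
termination_by (hi - lo).toNat
decreasing_by
  all_goals
    rw [PySem.Int.floordiv_eq_ediv_of_pos (by omega)]
    omega

def solve_alt (data : String) : Int :=
  let cs := data.toList
  let tail : Int := if PySem.List.pyGetD cs (-1) ' ' = '-' then 1 else 0
  pvDC cs 0 (cs.length : Int) + tail

-- ===== PRECONDITION & SPEC =====
-- Pre_ excludes only the empty string, on which A raises IndexError at data[-1].
def Pre_solve (data : String) : Prop := data ≠ ""
instance (data : String) : Decidable (Pre_solve data) := by unfold Pre_solve; infer_instance
def pvWitness_solve : String := "+-+"
def Spec_solve (data : String) (out : Int) : Prop := out = solve_alt data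
instance (data : String) (out : Int) : Decidable (Spec_solve data out) := by unfold Spec_solve; infer_instance

-- ===== CLAIM (what is proved, stated in full; the proofs are below) =====
def Claim_equal_solve : Prop := ∀ (data : String), Dom_solve data → Pre_solve data → Spec_solve data (solve data)

-- ===== LEMMAS AND PROOFS =====

/-- Number of adjacent unequal pairs (sign transitions). -/
def pvTrans : List Char → Nat
  | a :: b :: t => (if a ≠ b then 1 else 0) + pvTrans (b :: t)
  | _ => 0

/-- The summand of the interval sums: 1 iff position `i` differs from position `i-1`. -/
def pvInd (cs : List Char) (i : Nat) : Int :=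
  if cs.getD (i - 1) ' ' ≠ cs.getD i ' ' then 1 else 0

theorem pvTrans_cons_cons (a b : Char) (t : List Char) :
    pvTrans (a :: b :: t) = (if a ≠ b then 1 else 0) + pvTrans (b :: t) := rfl

/-- A's loop, reduced to `List.getD`, adds `pvTrans cs` to the accumulator. -/
theorem pvFoldA (cs : List Char) (init : Int) :
    (List.range (cs.length - 1)).foldl
      (fun c k => if cs.getD k ' ' ≠ cs.getD (k + 1) ' ' then c + 1 else c) init
    = init + pvTrans cs := by
  induction cs generalizing init with
  | nil => simp [pvTrans]
  | cons a t ih =>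
    cases t with
    | nil => simp [pvTrans]
    | cons b u =>
      have hlen : (a :: b :: u).length - 1 = ((b :: u).length - 1) + 1 := by simp
      rw [hlen, List.range_succ_eq_map]
      simp only [List.foldl_cons, List.foldl_map]
      have h0 : (a :: b :: u).getD 0 ' ' = a := rfl
      have h1 : (a :: b :: u).getD (0 + 1) ' ' = b := rfl
      rw [h0, h1]
      have hfun :
          (fun (c : Int) (k : Nat) =>
            if (a :: b :: u).getD (k + 1) ' ' ≠ (a :: b :: u).getD (k + 1 + 1) ' '
            then c + 1 else c)
          = (fun (c : Int) (k : Nat) =>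
            if (b :: u).getD k ' ' ≠ (b :: u).getD (k + 1) ' ' then c + 1 else c) := by
        funext c k; rfl
      rw [hfun, ih, pvTrans_cons_cons]
      split_ifs with h <;> push_cast <;> ring

/-- B's recursion computes the sum of `pvInd` over the open interval `(lo, hi)`. -/
theorem pvDC_sum (cs : List Char) :
    ∀ (n : Nat) (lo hi : Int), (hi - lo).toNat ≤ n → 0 ≤ lo →
      pvDC cs lo hi = ∑ i ∈ Finset.Ico (lo.toNat + 1) hi.toNat, pvInd cs i := by
  intro n
  induction n with
  | zero =>
    intro lo hi hn hlo
    rw [pvDC, if_pos (by omega)]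
    rw [Finset.Ico_eq_empty (by omega)]
    simp
  | succ n ih =>
    intro lo hi hn hlo
    by_cases hlt : hi - lo < 2
    · rw [pvDC, if_pos hlt]
      rw [Finset.Ico_eq_empty (by omega)]
      simp
    · rw [pvDC, if_neg hlt]
      have hm : PySem.Int.floordiv (lo + hi) 2 = (lo + hi) / 2 :=
        PySem.Int.floordiv_eq_ediv_of_pos (by omega)
      simp only [hm]
      set mid := (lo + hi) / 2 with hmid
      have hb1 : lo + 1 ≤ mid := by omega
      have hb2 : mid ≤ hi - 1 := by omega
      rw [ih lo mid (by omega) hlo, ih mid hi (by omega) (by omega)]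
      have hsplit :
          (∑ i ∈ Finset.Ico (lo.toNat + 1) mid.toNat, pvInd cs i)
            + ∑ i ∈ Finset.Ico mid.toNat hi.toNat, pvInd cs i
          = ∑ i ∈ Finset.Ico (lo.toNat + 1) hi.toNat, pvInd cs i :=
        Finset.sum_Ico_consecutive _ (by omega) (by omega)
      have hbot :
          ∑ i ∈ Finset.Ico mid.toNat hi.toNat, pvInd cs i
          = pvInd cs mid.toNat
            + ∑ i ∈ Finset.Ico (mid.toNat + 1) hi.toNat, pvInd cs i :=
        Finset.sum_eq_sum_Ico_succ_bot (by omega) _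
      have hterm :
          (if PySem.List.pyGetD cs (mid - 1) ' ' ≠ PySem.List.pyGetD cs mid ' '
           then (1 : Int) else 0) = pvInd cs mid.toNat := by
        have e1 : mid - 1 = ((mid.toNat - 1 : Nat) : Int) := by omega
        have e2 : mid = ((mid.toNat : Nat) : Int) := by omega
        rw [e1, e2, PySem.List.pyGetD_natCast, PySem.List.pyGetD_natCast]
        rfl
      rw [hterm]
      omega

/-- The interval sum over the whole string is the transition count. -/
theorem pvSum_trans (cs : List Char) :
    ∑ i ∈ Finset.Ico 1 cs.length, pvInd cs i = (pvTrans cs : Int) := by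
  rw [Finset.sum_Ico_eq_sum_range]
  induction cs with
  | nil => simp [pvTrans]
  | cons a t ih =>
    cases t with
    | nil => simp [pvTrans]
    | cons b u =>
      have hlen : (a :: b :: u).length - 1 = ((b :: u).length - 1) + 1 := by simp
      rw [hlen, Finset.sum_range_succ']
      have hshift :
          ∀ i, pvInd (a :: b :: u) (1 + (i + 1)) = pvInd (b :: u) (1 + i) := by
        intro i
        unfold pvInd
        have e1 : 1 + (i + 1) - 1 = (i + 1 - 1) + 1 := by omega
        have e2 : 1 + (i + 1) = (1 + i) + 1 := by omega
        rw [e1, e2, List.getD_cons_succ, List.getD_cons_succ,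
          show i + 1 - 1 = 1 + i - 1 from by omega]
      simp only [hshift]
      rw [ih, pvTrans_cons_cons]
      have h0 : pvInd (a :: b :: u) (1 + 0) = if a ≠ b then 1 else 0 := by
        unfold pvInd
        rfl
      rw [h0]
      split_ifs <;> push_cast <;> ring

theorem pv_toList_ne_nil (data : String) (h : data ≠ "") : data.toList ≠ [] := by
  intro h'
  apply h
  have := congrArg String.ofList h'
  simpa using this

-- ===== VERDICT (by name: the statement is the Claim_ definition above) =====
theorem solve_spec : Claim_equal_solve := by
  intro data _ hpre
  unfold Spec_solve solve solve_alt
  have hcs : data.toList ≠ [] := pv_toList_ne_nil data hpre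
  obtain ⟨x, xs, hx⟩ := List.exists_cons_of_ne_nil hcs
  simp only [hx]
  -- A side: rewrite the pyRange fold to a List.range fold over getD
  rw [PySem.List.pyRange_one]
  have hlen : (((x :: xs).length : Int) - 1 - 0).toNat = (x :: xs).length - 1 := by
    simp
  rw [hlen, List.foldl_map]
  have hfun :
      (fun (c : Int) (k : Nat) =>
        if PySem.List.pyGetD (x :: xs) (0 + (k : Int)) ' '
            ≠ PySem.List.pyGetD (x :: xs) (0 + (k : Int) + 1) ' ' then c + 1 else c)
      = (fun (c : Int) (k : Nat) =>
        if (x :: xs).getD k ' ' ≠ (x :: xs).getD (k + 1) ' ' then c + 1 else c) := by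
    funext c k
    have h2 : (0 : Int) + (k : Int) + 1 = (((k + 1 : Nat) : Int)) := by omega
    have h1 : (0 : Int) + (k : Int) = ((k : Nat) : Int) := by omega
    rw [h2, h1, PySem.List.pyGetD_natCast, PySem.List.pyGetD_natCast]
  rw [hfun, pvFoldA]
  -- B side: the divide-and-conquer recursion sums pvInd over (0, len), i.e. pvTrans
  have hdc := pvDC_sum (x :: xs) ((((x :: xs).length : Int) - 0).toNat)
    0 ((x :: xs).length : Int) (le_refl _) (le_refl 0)
  have htn : (((x :: xs).length : Int)).toNat = (x :: xs).length := by simp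
  rw [htn] at hdc
  rw [hdc, (by norm_num : (0 : Int).toNat + 1 = 1), pvSum_trans]
  -- the two last-character corrections coincide
  have hpat : PySem.List.pyGetD ['-', '+'] 0 ' ' = '-' := by decide
  rw [hpat]
  ring
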